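-- pv_equiv track=rewrite | github.com/DayNice/python-study | src/baekjoon/class1/Sol1157.py | get_argmax
-- ===== SOURCE A (Python) =====
-- def get_argmax(counts):
--     max_val = -1
--     out = -1
--     for i in range(len(counts)):
--         if counts[i] > max_val:
--             max_val = counts[i]
--             out = i
--         elif counts[i] == max_val:
--             out = -1
--     return out
-- ===== SOURCE B (Python) =====
-- def get_argmax(counts):
--     m = max(counts, default=-1)
--     if m > -1 and counts.count(m) == 1:
--         return counts.index(m)
--     return -1
-- ===== Notes on version B (the rewrite author's own statement) =====
-- stated objective: simpler
-- what changed: Replaced the fused single-pass argmax-with-tie-tracking loop over indices by a max-then-count/index decomposition: compute the maximum, return its index only if it exceeds -1 and occurs exactly once, else -1.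
import Mathlib
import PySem

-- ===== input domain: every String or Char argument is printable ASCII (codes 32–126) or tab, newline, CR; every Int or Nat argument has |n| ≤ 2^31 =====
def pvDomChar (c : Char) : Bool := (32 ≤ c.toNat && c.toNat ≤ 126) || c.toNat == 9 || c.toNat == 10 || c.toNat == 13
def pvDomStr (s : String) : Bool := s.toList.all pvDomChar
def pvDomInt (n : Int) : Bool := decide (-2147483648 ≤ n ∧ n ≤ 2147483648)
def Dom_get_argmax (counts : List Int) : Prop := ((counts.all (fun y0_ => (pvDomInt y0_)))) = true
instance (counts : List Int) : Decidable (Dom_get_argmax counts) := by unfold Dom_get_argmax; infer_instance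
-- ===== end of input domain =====

-- B replaces A's fused single-pass argmax-with-tie-tracking by a max/count/index decomposition (simpler).


-- ===== PORT A =====
-- A's loop 'for i in range(len(counts))' with state (max_val, out), as structural
-- recursion over the list carrying the index i.
def getArgmaxLoopA : List Int → Int → Int → Int → Int
  | [], _, _, out => out
  | v :: rest, i, max_val, out =>
    if v > max_val then getArgmaxLoopA rest (i + 1) v i
    else if v = max_val then getArgmaxLoopA rest (i + 1) max_val (-1)
    else getArgmaxLoopA rest (i + 1) max_val out

def get_argmax (counts : List Int) : Int := getArgmaxLoopA counts 0 (-1) (-1)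

-- ===== PORT B =====
def get_argmax_alt (counts : List Int) : Int :=
  let m := (PySem.List.max? counts (fun x => x)).getD (-1)
  if m > -1 ∧ PySem.List.count counts m = 1 then
    (((PySem.List.index? counts m).getD 0 : Nat) : Int)
  else (-1 : Int)

-- ===== PRECONDITION & SPEC =====
def Spec_get_argmax (counts : List Int) (out : Int) : Prop := out = get_argmax_alt counts
instance (counts : List Int) (out : Int) : Decidable (Spec_get_argmax counts out) := by unfold Spec_get_argmax; infer_instance

-- ===== CLAIM (what is proved, stated in full; the proofs are below) =====
def Claim_equal_get_argmax : Prop := ∀ (counts : List Int), Dom_get_argmax counts → Spec_get_argmax counts (get_argmax counts)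

-- ===== LEMMAS AND PROOFS =====

lemma foldl_max_comm (t : List Int) (a b : Int) :
    t.foldl max (max a b) = max a (t.foldl max b) := by
  induction t generalizing b with
  | nil => simp
  | cons c t ih =>
    simp only [List.foldl_cons]
    rw [max_assoc, ih]

-- shifting of the 'count = 1 → index' branch by one cons of a non-maximal element
lemma shift_branch (rest : List Int) (v M i : Int) (hne : v ≠ M) (hmem : M ∈ rest) :
    (if (v :: rest).count M = 1 then i + (((PySem.List.index? (v :: rest) M).getD 0 : Nat) : Int) else -1)
      = (if rest.count M = 1 then (i + 1) + (((PySem.List.index? rest M).getD 0 : Nat) : Int) else -1) := by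
  have hc : (v :: rest).count M = rest.count M := by
    rw [List.count_cons]; simp [hne]
  obtain ⟨k, hk⟩ : ∃ k, PySem.List.index? rest M = some k := by
    have := (PySem.List.index?_isSome_iff (xs := rest) (v := M)).mpr hmem
    exact Option.isSome_iff_exists.mp this
  rw [hc, PySem.List.index?_cons_of_ne rest hne, hk]
  simp only [Option.map_some, Option.getD_some]
  split
  · push_cast; ring
  · rfl

-- characterisation of A's loop
lemma getArgmaxLoopA_char (l : List Int) : ∀ (i m out : Int),
    getArgmaxLoopA l i m out =
      if l.foldl max m > m then
        (if l.count (l.foldl max m) = 1 then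
          i + (((PySem.List.index? l (l.foldl max m)).getD 0 : Nat) : Int)
        else -1)
      else (if m ∈ l then -1 else out) := by
  induction l with
  | nil => intro i m out; simp [getArgmaxLoopA]
  | cons v rest ih =>
    intro i m out
    have hfold : (v :: rest).foldl max m = rest.foldl max (max m v) := by
      simp [List.foldl_cons]
    by_cases hv : v > m
    · -- branch 1: new maximum
      have hmax : max m v = v := by omega
      have hge : v ≤ rest.foldl max v := (PySem.List.le_foldl_max rest v).1
      have hM : (v :: rest).foldl max m = rest.foldl max v := by rw [hfold, hmax]
      have hMgt : (v :: rest).foldl max m > m := by rw [hM]; omega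
      rw [getArgmaxLoopA, if_pos hv, ih, if_pos hMgt]
      by_cases h2 : rest.foldl max v > v
      · have hMne : v ≠ rest.foldl max v := by omega
        have hMmem : rest.foldl max v ∈ rest := by
          rcases PySem.List.foldl_max_mem rest v with h | h
          · omega
          · exact h
        rw [if_pos h2, hM, ← shift_branch rest v (rest.foldl max v) i hMne hMmem]
      · have hMv : rest.foldl max v = v := by omega
        rw [if_neg h2, hM, hMv]
        rw [List.count_cons_self, PySem.List.index?_cons_self]
        by_cases hmem : v ∈ rest
        · have : rest.count v ≠ 0 := by
            simpa [List.count_eq_zero] using hmem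
          rw [if_pos hmem, if_neg (by omega)]
        · have : rest.count v = 0 := List.count_eq_zero.mpr hmem
          rw [if_neg hmem, if_pos (by omega)]
          simp
    · by_cases hv2 : v = m
      · -- branch 2: tie with current maximum
        subst hv2
        have hM : (v :: rest).foldl max v = rest.foldl max v := by
          rw [hfold]; simp
        rw [getArgmaxLoopA, if_neg hv, if_pos rfl, ih, hM]
        by_cases h2 : rest.foldl max v > v
        · have hMne : v ≠ rest.foldl max v := by omega
          have hMmem : rest.foldl max v ∈ rest := by
            rcases PySem.List.foldl_max_mem rest v with h | h
            · omega
            · exact h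
          rw [if_pos h2, if_pos h2, ← shift_branch rest v (rest.foldl max v) i hMne hMmem]
        · rw [if_neg h2, if_neg h2, if_pos (List.mem_cons_self)]
          split <;> rfl
      · -- branch 3: strictly smaller element
        have hvlt : v < m := by omega
        have hM : (v :: rest).foldl max m = rest.foldl max m := by
          rw [hfold]; congr 1; omega
        have hge : m ≤ rest.foldl max m := (PySem.List.le_foldl_max rest m).1
        rw [getArgmaxLoopA, if_neg hv, if_neg hv2, ih, hM]
        by_cases h2 : rest.foldl max m > m
        · have hMne : v ≠ rest.foldl max m := by omega
          have hMmem : rest.foldl max m ∈ rest := by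
            rcases PySem.List.foldl_max_mem rest m with h | h
            · omega
            · exact h
          rw [if_pos h2, if_pos h2, ← shift_branch rest v (rest.foldl max m) i hMne hMmem]
        · rw [if_neg h2, if_neg h2]
          have hmi : (m ∈ v :: rest) ↔ (m ∈ rest) := by
            constructor
            · intro h; rcases List.mem_cons.mp h with h | h
              · exact absurd h.symm hv2
              · exact h
            · exact List.mem_cons_of_mem v
          by_cases hmem : m ∈ rest
          · rw [if_pos hmem, if_pos (hmi.mpr hmem)]
          · rw [if_neg hmem, if_neg (fun h => hmem (hmi.mp h))]

-- ===== VERDICT (by name: the statement is the Claim_ definition above) =====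
theorem get_argmax_spec : Claim_equal_get_argmax := by
  intro counts _
  unfold Spec_get_argmax
  cases counts with
  | nil => decide
  | cons x t =>
    show getArgmaxLoopA (x :: t) 0 (-1) (-1) = _
    rw [getArgmaxLoopA_char]
    have hB : get_argmax_alt (x :: t) =
        if t.foldl max x > -1 ∧ PySem.List.count (x :: t) (t.foldl max x) = 1 then
          (((PySem.List.index? (x :: t) (t.foldl max x)).getD 0 : Nat) : Int)
        else (-1 : Int) := by
      unfold get_argmax_alt
      rw [PySem.List.max?_id_cons]
      rfl
    have hfold : (x :: t).foldl max (-1) = max (-1) (t.foldl max x) := by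
      simp only [List.foldl_cons]
      exact foldl_max_comm t (-1) x
    rw [hB, hfold]
    by_cases h : t.foldl max x > -1
    · have hmx : max (-1) (t.foldl max x) = t.foldl max x := by omega
      rw [hmx, if_pos h]
      by_cases hc : (x :: t).count (t.foldl max x) = 1
      · rw [if_pos hc, if_pos ⟨h, by simpa [PySem.List.count_eq] using hc⟩]
        omega
      · rw [if_neg hc,
            if_neg (fun hco => hc (by simpa [PySem.List.count_eq] using hco.2))]
    · have hmx : max (-1) (t.foldl max x) = -1 := by omega
      have hg : ¬(t.foldl max x > -1 ∧ PySem.List.count (x :: t) (t.foldl max x) = 1) :=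
        fun hco => h hco.1
      rw [hmx, if_neg (show ¬((-1 : Int) > -1) by omega), if_neg hg]
      split <;> rfl
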